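-- pv_equiv track=rewrite | github.com/VforVitorio/F1_Telemetry_Manager | frontend/components/comparison/circuit_comparison.py | _calculate_microsector_indices
-- ===== SOURCE A (Python) =====
-- from typing import Dict, List
--
-- def _calculate_microsector_indices(num_points: int, num_microsectors: int) -> List[tuple]:
--     """
--     Calculate start and end indices for each microsector.
--
--     Args:
--         num_points: Total number of circuit points
--         num_microsectors: Number of microsectors to divide circuit into (25)
--
--     Returns:
--         List of tuples (start_idx, end_idx) for each microsector
--     """
--     points_per_sector = num_points // num_microsectors
--     microsector_indices = []
--
--     for sector_idx in range(num_microsectors):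
--         start_idx = sector_idx * points_per_sector
--         # Last microsector extends to end of circuit
--         end_idx = num_points if sector_idx == num_microsectors - \
--             1 else (sector_idx + 1) * points_per_sector
--         microsector_indices.append((start_idx, end_idx))
--
--     return microsector_indices
-- ===== SOURCE B (Python) =====
-- def _calculate_microsector_indices(num_points: int, num_microsectors: int):
--     # Walk the circuit backwards: emit the last microsector first (ending at
--     # num_points) and carry each sector's start down as the previous sector's
--     # end, then reverse. No last-sector branch and no precomputed cut table.
--     points_per_sector = num_points // num_microsectors
--     pairs_reversed = []
--     end = num_points
--     for sector_idx in range(num_microsectors - 1, -1, -1):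
--         start = sector_idx * points_per_sector
--         pairs_reversed.append((start, end))
--         end = start
--     pairs_reversed.reverse()
--     return pairs_reversed
-- ===== Notes on version B (the rewrite author's own statement) =====
-- stated objective: alternative
-- what changed: B traverses the sectors backwards, emitting the final sector first and carrying each sector's start down as the previous sector's end boundary, then reverses the list; this removes A's per-iteration last-sector branch and the forward index arithmetic for end_idx.
import Mathlib
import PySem

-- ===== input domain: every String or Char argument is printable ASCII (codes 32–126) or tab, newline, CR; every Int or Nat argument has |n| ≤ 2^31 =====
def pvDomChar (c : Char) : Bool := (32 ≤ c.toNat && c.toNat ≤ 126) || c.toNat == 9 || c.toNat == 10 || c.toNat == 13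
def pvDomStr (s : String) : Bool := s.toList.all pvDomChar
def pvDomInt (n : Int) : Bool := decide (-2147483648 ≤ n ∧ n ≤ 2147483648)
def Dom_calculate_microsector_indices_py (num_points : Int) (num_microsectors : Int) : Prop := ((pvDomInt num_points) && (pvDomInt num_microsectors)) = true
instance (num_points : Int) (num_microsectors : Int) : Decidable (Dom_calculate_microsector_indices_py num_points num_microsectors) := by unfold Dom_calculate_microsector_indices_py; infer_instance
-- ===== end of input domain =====

-- B builds the pair list back-to-front, carrying each sector's start down as the previous sector's end (no last-sector branch), then reverses (simpler decomposition; return-value equivalence, B reverses its list in place).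


-- ===== PORT A =====
def calculate_microsector_indices_py (num_points : Int) (num_microsectors : Int) : List (Int × Int) :=
  let points_per_sector := PySem.Int.floordiv num_points num_microsectors
  (PySem.List.pyRange 0 num_microsectors 1).foldl
    (fun acc sector_idx =>
      acc ++ [(sector_idx * points_per_sector,
               if sector_idx = num_microsectors - 1 then num_points
               else (sector_idx + 1) * points_per_sector)]) []

-- ===== PORT B =====
def calculate_microsector_indices_py_alt (num_points : Int) (num_microsectors : Int) : List (Int × Int) :=
  let points_per_sector := PySem.Int.floordiv num_points num_microsectors
  let st := (PySem.List.pyRange (num_microsectors - 1) (-1) (-1)).foldl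
    (fun (s : List (Int × Int) × Int) sector_idx =>
      let start := sector_idx * points_per_sector
      (s.1 ++ [(start, s.2)], start)) ([], num_points)
  st.1.reverse

-- ===== PRECONDITION & SPEC =====
-- Pre_ excludes only num_microsectors = 0, where A raises ZeroDivisionError (B raises it too).
def Pre_calculate_microsector_indices_py (num_points : Int) (num_microsectors : Int) : Prop := num_microsectors ≠ 0
instance (num_points : Int) (num_microsectors : Int) : Decidable (Pre_calculate_microsector_indices_py num_points num_microsectors) := by unfold Pre_calculate_microsector_indices_py; infer_instance
def pvWitness_calculate_microsector_indices_py : Int × Int := (10, 3)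

def Spec_calculate_microsector_indices_py (num_points : Int) (num_microsectors : Int) (out : List (Int × Int)) : Prop := out = calculate_microsector_indices_py_alt num_points num_microsectors
instance (num_points : Int) (num_microsectors : Int) (out : List (Int × Int)) : Decidable (Spec_calculate_microsector_indices_py num_points num_microsectors out) := by unfold Spec_calculate_microsector_indices_py; infer_instance

-- ===== CLAIM (what is proved, stated in full; the proofs are below) =====
def Claim_equal_calculate_microsector_indices_py : Prop := ∀ (num_points : Int) (num_microsectors : Int), Dom_calculate_microsector_indices_py num_points num_microsectors → Pre_calculate_microsector_indices_py num_points num_microsectors → Spec_calculate_microsector_indices_py num_points num_microsectors (calculate_microsector_indices_py num_points num_microsectors)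

-- ===== LEMMAS AND PROOFS =====

-- B's backward fold over range(n-1, -1, -1), started with end boundary e, appends
-- (in processing order, i.e. descending sector index) the pairs (k*q, carried end).
theorem pv_fold_desc (q : Int) (n : Nat) :
    ∀ (acc : List (Int × Int)) (e : Int),
    ((PySem.List.pyRange ((n : Int) - 1) (-1) (-1)).foldl
      (fun (s : List (Int × Int) × Int) i => (s.1 ++ [(i * q, s.2)], i * q)) (acc, e)).1
    = acc ++ (List.range n).reverse.map
        (fun (k : Nat) => ((k : Int) * q, if k + 1 = n then e else ((k : Int) + 1) * q)) := by
  induction n with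
  | zero =>
    intro acc e
    rw [PySem.List.pyRange_neg_one_eq_nil (by norm_num)]
    simp
  | succ m ih =>
    intro acc e
    have hlt : (-1 : Int) < (↑(m + 1) : Int) - 1 := by push_cast; omega
    have hstep : ((↑(m + 1) : Int) - 1) = (m : Int) := by push_cast; ring
    rw [PySem.List.pyRange_neg_one_cons hlt]
    simp only [hstep]
    rw [List.foldl_cons]
    show ((PySem.List.pyRange ((m : Int) - 1) (-1) (-1)).foldl
      (fun (s : List (Int × Int) × Int) i => (s.1 ++ [(i * q, s.2)], i * q))
      (acc ++ [((m : Int) * q, e)], (m : Int) * q)).1 = _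
    rw [ih (acc ++ [((m : Int) * q, e)]) ((m : Int) * q)]
    rw [List.range_succ, List.reverse_append, List.reverse_singleton, List.singleton_append,
      List.map_cons, List.append_assoc, List.singleton_append]
    rw [if_pos rfl]
    congr 2
    apply List.map_congr_left
    intro a ha
    have ha' : a < m := List.mem_range.mp (List.mem_reverse.mp ha)
    rw [if_neg (by omega : ¬ a + 1 = m + 1)]
    by_cases h : a + 1 = m
    · rw [if_pos h, show ((m : Int)) = (a : Int) + 1 by omega]
    · rw [if_neg h]

-- A's result as a map over List.range.
theorem pv_A_eq_map (P m : Int) :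
    calculate_microsector_indices_py P m
    = (List.range m.toNat).map (fun (k : Nat) =>
        ((k : Int) * PySem.Int.floordiv P m,
         if (k : Int) = m - 1 then P else ((k : Int) + 1) * PySem.Int.floordiv P m)) := by
  unfold calculate_microsector_indices_py
  rw [PySem.List.foldl_append_singleton_eq_map, List.nil_append, PySem.List.pyRange_one]
  simp only [Int.sub_zero, List.map_map, Function.comp_def]
  apply List.map_congr_left
  intro k _
  simp only [Int.zero_add]

theorem pv_ports_eq (P m : Int) :
    calculate_microsector_indices_py P m = calculate_microsector_indices_py_alt P m := by
  unfold calculate_microsector_indices_py_alt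
  dsimp only
  rw [pv_A_eq_map]
  by_cases hm : 0 < m
  · have hcast : ((m.toNat : Int)) = m := Int.toNat_of_nonneg (le_of_lt hm)
    rw [show m - 1 = ((m.toNat : Int)) - 1 by rw [hcast]]
    rw [pv_fold_desc (PySem.Int.floordiv P m) m.toNat [] P]
    rw [List.nil_append, List.map_reverse, List.reverse_reverse]
    apply List.map_congr_left
    intro k hk
    have hk' : k < m.toNat := by simpa using hk
    have hiff : ((k : Int) = (m.toNat : Int) - 1) ↔ (k + 1 = m.toNat) := by omega
    by_cases h : k + 1 = m.toNat
    · rw [if_pos (hiff.mpr h), if_pos h]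
    · rw [if_neg (hiff.not.mpr h), if_neg h]
  · -- m ≤ 0: both ranges are empty
    have h1 : m.toNat = 0 := by omega
    have h2 : m - 1 ≤ -1 := by omega
    rw [PySem.List.pyRange_neg_one_eq_nil h2]
    simp [h1]

-- ===== VERDICT (by name: the statement is the Claim_ definition above) =====
theorem calculate_microsector_indices_py_spec : Claim_equal_calculate_microsector_indices_py := by
  intro num_points num_microsectors _ _
  unfold Spec_calculate_microsector_indices_py
  exact pv_ports_eq num_points num_microsectors
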